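-- pv_equiv track=rewrite | github.com/daniel-reich/ubiquitous-fiesta | 8qD23E6XRMaWhyJ5z_12.py | happiness_number
-- ===== SOURCE A (Python) =====
-- def happiness_number(s):
--   count = 0
--   while len(s) > 1:
--     if ":)" in s[0:2] or "(:" in s[0:2]:
--       count += 1
--     elif ":(" in s[0:2] or "):" in s[0:2]:
--       count -= 1
--     s = s[1:]
--   return count
-- ===== SOURCE B (Python) =====
-- def happiness_number(s):
--   return s.count(":)") + s.count("(:") - s.count(":(") - s.count("):")
-- ===== Notes on version B (the rewrite author's own statement) =====
-- stated objective: simpler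
-- what changed: Replaced the character-by-character sliding while-loop with slicing and an if/elif chain by a one-line closed tally of four str.count aggregates (valid because none of the 2-char patterns overlaps itself, so each count equals the number of matching adjacent windows).
import Mathlib
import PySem

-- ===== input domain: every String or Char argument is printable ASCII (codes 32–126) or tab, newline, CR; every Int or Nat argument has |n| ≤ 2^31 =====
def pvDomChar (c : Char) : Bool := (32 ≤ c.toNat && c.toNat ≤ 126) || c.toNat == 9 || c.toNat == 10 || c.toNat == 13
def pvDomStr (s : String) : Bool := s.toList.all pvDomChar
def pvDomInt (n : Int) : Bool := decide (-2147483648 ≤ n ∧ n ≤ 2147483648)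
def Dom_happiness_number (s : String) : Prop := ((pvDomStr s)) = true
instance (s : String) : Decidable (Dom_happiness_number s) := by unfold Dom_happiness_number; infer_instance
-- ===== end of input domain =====

-- B replaces A's sliding while-loop by a closed tally of four non-overlapping substring counts (objective: simpler).

-- ===== PORT A =====
-- literal port of A's loop: while len(s) > 1, inspect s[0:2] with the if/elif chain, then s = s[1:]
def pvALoop : List Char → Int → Int
  | a :: b :: t, count =>
      let w := PySem.Chars.slice (a :: b :: t) (some 0) (some 2)
      let count' :=
        if PySem.Chars.isIn ":)".toList w || PySem.Chars.isIn "(:".toList w then count + 1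
        else if PySem.Chars.isIn ":(".toList w || PySem.Chars.isIn "):".toList w then count - 1
        else count
      pvALoop (PySem.Chars.slice (a :: b :: t) (some 1) none) count'
  | _, count => count
termination_by cs _ => cs.length
decreasing_by
  rw [PySem.Chars.slice_eq_listSlice, PySem.List.slice_from_one]
  simp

def happiness_number (s : String) : Int := pvALoop s.toList 0

-- ===== PORT B =====
def happiness_number_alt (s : String) : Int :=
  (PySem.Str.count s ":)" : Int) + (PySem.Str.count s "(:" : Int)
    - (PySem.Str.count s ":(" : Int) - (PySem.Str.count s "):" : Int)

-- ===== PRECONDITION & SPEC =====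
def Spec_happiness_number (s : String) (out : Int) : Prop := out = happiness_number_alt s
instance (s : String) (out : Int) : Decidable (Spec_happiness_number s out) := by unfold Spec_happiness_number; infer_instance

-- ===== CLAIM (what is proved, stated in full; the proofs are below) =====
def Claim_equal_happiness_number : Prop := ∀ (s : String), Dom_happiness_number s → Spec_happiness_number s (happiness_number s)

-- ===== LEMMAS AND PROOFS =====

-- number of adjacent windows of the list equal to the pair (x, y)
def pvWinsN (x y : Char) : List Char → Nat
  | a :: b :: t => (if a = x ∧ b = y then 1 else 0) + pvWinsN x y (b :: t)
  | _ => 0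

-- a window cannot start at a position whose first char differs from the pattern's first char
theorem pvWinsN_skip (x y d : Char) (t : List Char) (h : d ≠ x) :
    pvWinsN x y (d :: t) = pvWinsN x y t := by
  cases t with
  | nil => simp [pvWinsN]
  | cons e t' => simp [pvWinsN, h]

-- 'sub in w' for two 2-char lists is equality of the lists
theorem pvIsIn_pair (x y a b : Char) :
    PySem.Chars.isIn [x, y] [a, b] = (decide (a = x) && decide (b = y)) := by
  by_cases h : a = x ∧ b = y
  · obtain ⟨rfl, rfl⟩ := h
    simp [PySem.Chars.isIn_iff_infix]
  · have hni : ¬ ([x, y] <:+: [a, b]) := by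
      intro hinf
      have := hinf.sublist.eq_of_length (by simp)
      simp at this
      exact h ⟨this.1.symm, this.2.symm⟩
    rw [(PySem.Chars.isIn_eq_false_iff _ _).mpr hni]
    rcases Decidable.not_and_iff_not_or_not.mp h with h' | h' <;> simp [h']

-- Python's non-overlapping str.count of a 2-char pattern with distinct chars counts every matching window
theorem pvCountGo_eq (x y : Char) (hxy : x ≠ y) :
    ∀ (fuel : Nat) (l : List Char) (acc : Nat), l.length ≤ fuel →
      PySem.Chars.count.go [x, y] fuel l acc = acc + pvWinsN x y l := by
  intro fuel
  induction fuel with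
  | zero =>
    intro l acc h
    have hl : l = [] := by cases l with | nil => rfl | cons a t => simp at h
    subst hl; simp [PySem.Chars.count.go, pvWinsN]
  | succ f ih =>
    intro l acc h
    match l with
    | [] => simp [PySem.Chars.count.go, pvWinsN]
    | [c] =>
      have hpre : [x, y].isPrefixOf [c] = false := by
        simp [List.isPrefixOf]
      simp only [PySem.Chars.count.go, hpre]
      cases f with
      | zero => simp [PySem.Chars.count.go, pvWinsN]
      | succ f' => simp [PySem.Chars.count.go, pvWinsN]
    | c :: d :: t =>
      by_cases hp : c = x ∧ d = y
      · obtain ⟨rfl, rfl⟩ := hp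
        have hpre : [c, d].isPrefixOf (c :: d :: t) = true := by
          simp [List.isPrefixOf]
        simp only [PySem.Chars.count.go, hpre, if_pos]
        rw [show List.drop [c, d].length (c :: d :: t) = t from rfl]
        rw [ih t (acc + 1) (by simp at h ⊢; omega)]
        have : pvWinsN c d (c :: d :: t) = 1 + pvWinsN c d t := by
          rw [show pvWinsN c d (c :: d :: t) = 1 + pvWinsN c d (d :: t) by simp [pvWinsN]]
          rw [pvWinsN_skip c d d t (fun hdc => hxy hdc.symm)]
        omega
      · have hpre : [x, y].isPrefixOf (c :: d :: t) = false := by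
          simp [List.isPrefixOf]
          intro hxc hyd
          exact hp ⟨hxc.symm, hyd.symm⟩
        simp only [PySem.Chars.count.go, hpre, Bool.false_eq_true, if_false]
        rw [ih (d :: t) acc (by simp at h ⊢; omega)]
        have : pvWinsN x y (c :: d :: t) = pvWinsN x y (d :: t) := by
          simp [pvWinsN, hp]
        omega

theorem pvCount_eq_wins (x y : Char) (hxy : x ≠ y) (l : List Char) :
    PySem.Chars.count l [x, y] = pvWinsN x y l := by
  rw [show PySem.Chars.count l [x, y] = PySem.Chars.count.go [x, y] l.length l 0 from rfl]
  rw [pvCountGo_eq x y hxy l.length l 0 le_rfl]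
  omega

-- A's loop computes the signed tally of the four kinds of windows
theorem pvALoop_eq (cs : List Char) (count : Int) :
    pvALoop cs count = count + (pvWinsN ':' ')' cs : Int) + (pvWinsN '(' ':' cs : Int)
      - (pvWinsN ':' '(' cs : Int) - (pvWinsN ')' ':' cs : Int) := by
  fun_induction pvALoop cs count with
  | case1 a b t count w count' ih =>
    have hw : w = [a, b] := by
      simp only [w, PySem.Chars.slice_eq_listSlice]
      rw [PySem.List.slice_zero_start, PySem.List.slice_to (a :: b :: t) (show (0:Int) ≤ 2 by norm_num)]
      rfl
    have htail : PySem.Chars.slice (a :: b :: t) (some 1) none = b :: t := by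
      rw [PySem.Chars.slice_eq_listSlice, PySem.List.slice_from_one]; rfl
    rw [htail] at ih
    rw [htail, ih]
    have hc' : count' = count +
        ((if a = ':' ∧ b = ')' then 1 else 0) + (if a = '(' ∧ b = ':' then 1 else 0)
          - (if a = ':' ∧ b = '(' then 1 else 0) - (if a = ')' ∧ b = ':' then 1 else 0) : Int) := by
      simp only [count', hw, show (":)".toList) = [':', ')'] from rfl,
        show ("(:".toList) = ['(', ':'] from rfl, show (":(".toList) = [':', '('] from rfl,
        show ("):".toList) = [')', ':'] from rfl, pvIsIn_pair]
      split_ifs with h1 h2 <;> simp_all <;> omega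
    rw [hc']
    simp only [pvWinsN]
    push_cast
    split_ifs <;> simp_all <;> ring
  | case2 cs count h =>
    rcases cs with _ | ⟨c, _ | ⟨d, t⟩⟩
    · simp [pvWinsN]
    · simp [pvWinsN]
    · exact absurd rfl (h c d t)

-- ===== VERDICT (by name: the statement is the Claim_ definition above) =====
theorem happiness_number_spec : Claim_equal_happiness_number := by
  intro s _
  show happiness_number s = happiness_number_alt s
  unfold happiness_number happiness_number_alt
  rw [pvALoop_eq]
  simp only [PySem.Str.count_eq]
  rw [show (":)".toList) = [':', ')'] from rfl, show ("(:".toList) = ['(', ':'] from rfl,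
      show (":(".toList) = [':', '('] from rfl, show ("):".toList) = [')', ':'] from rfl]
  rw [pvCount_eq_wins _ _ (by decide), pvCount_eq_wins _ _ (by decide),
      pvCount_eq_wins _ _ (by decide), pvCount_eq_wins _ _ (by decide)]
  show (0 : Int) + _ + _ - _ - _ = _
  ring
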